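-- pv_equiv track=rewrite | github.com/22Pickles/MidnightStrategyAnalysis | int/strategies.py | str3
-- ===== SOURCE A (Python) =====
-- from typing import List
--
-- def str3(roll: List[int], pocket: List[int]) -> List[int]:
--     s: List[int] = []
--     if 1 not in pocket:
--         for i in range(len(roll)):
--             if roll[i] == 1:
--                 s.append(roll[i])
--                 break
--     if 4 not in pocket:
--         for i in range(len(roll)):
--             if roll[i] == 4:
--                 s.append(roll[i])
--                 break
--     for i in range(len(roll)):
--         if roll[i] == 6:
--             if len(roll) - len(s) < 4 and ((1 not in pocket) or (4 not in pocket)):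
--                 break
--             else:
--                 s.append(roll[i])
--     if len(s) == 0:
--         s.append(max(roll))
--     return s
-- ===== SOURCE B (Python) =====
-- from typing import List
--
-- def str3(roll: List[int], pocket: List[int]) -> List[int]:
--     s: List[int] = []
--     if 1 not in pocket and 1 in roll:
--         s.append(1)
--     if 4 not in pocket and 4 in roll:
--         s.append(4)
--     c6 = roll.count(6)
--     if 1 in pocket and 4 in pocket:
--         k = c6
--     else:
--         k = min(c6, max(0, len(roll) - 3 - len(s)))
--     s += [6] * k
--     return s if s else [max(roll)]
-- ===== Notes on version B (the rewrite author's own statement) =====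
-- stated objective: idiomatic
-- what changed: Replaces the three index-based scan loops (with a stateful mid-loop break on the growing kept list) by direct membership tests and a closed-form count of sixes to keep (min(count6, max(0, len(roll)-3-len(s)))) appended in one step.
import Mathlib
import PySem

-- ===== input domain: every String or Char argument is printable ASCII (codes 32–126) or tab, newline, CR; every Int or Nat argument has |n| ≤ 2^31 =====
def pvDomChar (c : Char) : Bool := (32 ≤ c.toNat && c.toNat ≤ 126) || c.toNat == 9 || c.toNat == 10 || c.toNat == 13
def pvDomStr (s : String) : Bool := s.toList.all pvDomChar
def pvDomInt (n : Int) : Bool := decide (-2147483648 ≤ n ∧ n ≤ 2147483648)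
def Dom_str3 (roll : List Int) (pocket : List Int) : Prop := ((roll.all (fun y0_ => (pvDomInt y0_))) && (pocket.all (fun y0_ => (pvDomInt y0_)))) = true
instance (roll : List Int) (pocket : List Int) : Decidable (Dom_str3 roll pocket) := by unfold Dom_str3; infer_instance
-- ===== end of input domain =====

-- B replaces A's three index-scan loops (with a stateful break) by membership tests and a
-- closed-form count of kept sixes; same cost, more idiomatic. Pre_ excludes roll = [] (max([]) raises).


-- ===== PORT A =====
-- 'if 1 not in pocket: for i in range(len(roll)): if roll[i] == 1: s.append(roll[i]); break'
def str3FindOne : List Int → List Int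
  | [] => []
  | x :: xs => if x = 1 then [x] else str3FindOne xs

def str3FindFour : List Int → List Int
  | [] => []
  | x :: xs => if x = 4 then [x] else str3FindFour xs

-- the third loop: n = len(roll), s = the kept dice so far
def str3SixLoop (n : Int) (pocket : List Int) : List Int → List Int → List Int
  | [], s => s
  | x :: xs, s =>
    if x = 6 then
      if n - (s.length : Int) < 4 ∧ (¬ (1:Int) ∈ pocket ∨ ¬ (4:Int) ∈ pocket) then s
      else str3SixLoop n pocket xs (s ++ [x])
    else str3SixLoop n pocket xs s

def str3 (roll : List Int) (pocket : List Int) : List Int :=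
  let s1 : List Int := if (1:Int) ∈ pocket then [] else str3FindOne roll
  let s2 : List Int := s1 ++ (if (4:Int) ∈ pocket then [] else str3FindFour roll)
  let s3 : List Int := str3SixLoop (roll.length : Int) pocket roll s2
  if s3.length = 0 then s3 ++ [(PySem.List.max? roll (fun y => y)).getD 0] else s3

-- ===== PORT B =====
def str3_alt (roll : List Int) (pocket : List Int) : List Int :=
  let s : List Int :=
    (if ¬ (1:Int) ∈ pocket ∧ (1:Int) ∈ roll then [(1:Int)] else [])
      ++ (if ¬ (4:Int) ∈ pocket ∧ (4:Int) ∈ roll then [(4:Int)] else [])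
  let c6 : Int := (roll.count (6:Int) : Int)
  let k : Int :=
    if (1:Int) ∈ pocket ∧ (4:Int) ∈ pocket then c6
    else min c6 (max 0 ((roll.length : Int) - 3 - (s.length : Int)))
  let s' : List Int := s ++ PySem.List.pyRepeat [(6:Int)] k
  if s' = [] then [(PySem.List.max? roll (fun y => y)).getD 0] else s'

-- ===== PRECONDITION & SPEC =====
-- Pre_ excludes exactly roll = [], on which A (and B) raise ValueError from max(roll).
def Pre_str3 (roll : List Int) (pocket : List Int) : Prop := roll ≠ []
instance (roll : List Int) (pocket : List Int) : Decidable (Pre_str3 roll pocket) := by unfold Pre_str3; infer_instance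
def pvWitness_str3 : List Int × List Int := ([1, 6, 6, 6, 6], [2])

def Spec_str3 (roll : List Int) (pocket : List Int) (out : List Int) : Prop := out = str3_alt roll pocket
instance (roll : List Int) (pocket : List Int) (out : List Int) : Decidable (Spec_str3 roll pocket out) := by unfold Spec_str3; infer_instance

-- ===== CLAIM (what is proved, stated in full; the proofs are below) =====
def Claim_equal_str3 : Prop := ∀ (roll : List Int) (pocket : List Int), Dom_str3 roll pocket → Pre_str3 roll pocket → Spec_str3 roll pocket (str3 roll pocket)

-- ===== LEMMAS AND PROOFS =====
theorem findOne_eq (roll : List Int) :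
    str3FindOne roll = if (1:Int) ∈ roll then [1] else [] := by
  induction roll with
  | nil => simp [str3FindOne]
  | cons x xs ih =>
    by_cases h : x = 1
    · simp [str3FindOne, h]
    · simp [str3FindOne, h, ih, Ne.symm h]

theorem findFour_eq (roll : List Int) :
    str3FindFour roll = if (4:Int) ∈ roll then [4] else [] := by
  induction roll with
  | nil => simp [str3FindFour]
  | cons x xs ih =>
    by_cases h : x = 4
    · simp [str3FindFour, h]
    · simp [str3FindFour, h, ih, Ne.symm h]

-- when both 1 and 4 are pocketed the break condition never fires: all sixes are kept
theorem sixLoop_nobreak (n : Int) (pocket : List Int)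
    (h1 : (1:Int) ∈ pocket) (h4 : (4:Int) ∈ pocket) :
    ∀ (l s : List Int), str3SixLoop n pocket l s = s ++ List.replicate (l.count 6) 6 := by
  intro l
  induction l with
  | nil => intro s; simp [str3SixLoop]
  | cons x xs ih =>
    intro s
    by_cases hx : x = 6
    · subst hx
      have hcond : ¬ (n - (s.length : Int) < 4 ∧ (¬ (1:Int) ∈ pocket ∨ ¬ (4:Int) ∈ pocket)) := by
        simp [h1, h4]
      rw [str3SixLoop, if_pos rfl, if_neg hcond, ih]
      simp [List.count_cons, List.replicate_succ, List.append_assoc]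
    · rw [str3SixLoop, if_neg hx, ih]
      simp [List.count_cons, hx, Ne.symm hx]

-- otherwise the loop keeps min(count6, max(0, n - 3 - len(s))) sixes
theorem sixLoop_break (n : Int) (pocket : List Int)
    (h : ¬ (1:Int) ∈ pocket ∨ ¬ (4:Int) ∈ pocket) :
    ∀ (l s : List Int), str3SixLoop n pocket l s
      = s ++ List.replicate (min ((l.count 6 : Int)) (max 0 (n - 3 - (s.length : Int)))).toNat 6 := by
  intro l
  induction l with
  | nil =>
    intro s
    have hz : (min (((List.count 6 ([] : List Int)) : Int)) (max 0 (n - 3 - (s.length : Int)))).toNat = 0 := by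
      simp
    rw [str3SixLoop, hz]
    simp
  | cons x xs ih =>
    intro s
    by_cases hx : x = 6
    · subst hx
      by_cases hb : n - (s.length : Int) < 4
      · have hz : (min (((List.count 6 ((6:Int) :: xs)) : Int)) (max 0 (n - 3 - (s.length : Int)))).toNat = 0 := by
          have hnn : (0:Int) ≤ ((List.count 6 ((6:Int) :: xs)) : Int) := Int.natCast_nonneg _
          omega
        rw [str3SixLoop, if_pos rfl, if_pos ⟨hb, h⟩, hz]
        simp
      · rw [str3SixLoop, if_pos rfl, if_neg (by intro hc; exact hb hc.1), ih]
        have hc : List.count 6 ((6:Int) :: xs) = List.count 6 xs + 1 := by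
          simp [List.count_cons]
        have hk : (min ((List.count 6 xs : Int)) (max 0 (n - 3 - ((s.length : Int) + 1)))).toNat + 1
            = (min ((List.count 6 ((6:Int) :: xs) : Int)) (max 0 (n - 3 - (s.length : Int)))).toNat := by
          rw [hc]; push_cast; omega
        rw [← hk]
        simp [List.replicate_succ, List.append_assoc]
    · rw [str3SixLoop, if_neg hx, ih]
      have hc : List.count 6 (x :: xs) = List.count 6 xs := by
        simp [List.count_cons]
        exact hx
      rw [hc]

theorem str3_eq_alt (roll pocket : List Int) : str3 roll pocket = str3_alt roll pocket := by
  simp only [str3, str3_alt]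
  by_cases h1 : (1:Int) ∈ pocket <;> by_cases h4 : (4:Int) ∈ pocket
  · -- both pocketed
    rw [sixLoop_nobreak _ _ h1 h4, PySem.List.pyRepeat_singleton]
    simp [h1, h4]
    split_ifs with hc
    · simp [hc]
    · rfl
  all_goals {
    have hd : ¬ (1:Int) ∈ pocket ∨ ¬ (4:Int) ∈ pocket := by tauto
    have hk : ¬ ((1:Int) ∈ pocket ∧ (4:Int) ∈ pocket) := by tauto
    rw [sixLoop_break _ _ hd, PySem.List.pyRepeat_singleton, findOne_eq, findFour_eq]
    simp only [h1, h4, hk, if_true, if_false, ite_true, not_true, not_false_iff, true_and,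
      false_and, and_true, List.nil_append, List.append_nil]
    by_cases r1 : (1:Int) ∈ roll <;> by_cases r4 : (4:Int) ∈ roll <;>
      simp [r1, r4] <;>
      (try (split_ifs with hc <;> first | rfl | (simp; omega)))
  }

-- ===== VERDICT (by name: the statement is the Claim_ definition above) =====
theorem str3_spec : Claim_equal_str3 := by
  intro roll pocket _ _
  unfold Spec_str3
  exact str3_eq_alt roll pocket
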